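-- pv_equiv track=rewrite | github.com/KirillSokirka/OOP | Lab1/task4.py | get_goldbar_list
-- ===== SOURCE A (Python) =====
-- def get_table(weights, capacity):
--     """
--         This func create a table of memoization:
--             rows - weights of goldbar
--             columns - capacity of knapsack from 0 to real capacity
--     :param weights: list of golds weights
--     :param capacity: capacity of knapsack
--     :return: a table of memoization and list of weights
--     """
--     golds_number = len(weights)
--     table = [[0 for gold in range(capacity+1)] for i in range(golds_number+1)]
--     for bar in range(golds_number+1):
--         for weight in range(capacity+1):
--             if bar == 0 or weight == 0:
--                 table[bar][weight] = 0
--             elif weights[bar-1] <= weight: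
--                 table[bar][weight] = max(weights[bar-1] + table[bar-1][weight - weights[bar - 1]], table[bar-1][weight])
--             else:
--                 table[bar][weight] = table[bar-1][weight]
--
--     return table, weights
--
-- def get_goldbar_list(weights_list, init_capacity):
--     """
--         This func use @get_table@ to get table of memoization,
--         after looping though it finds the list of right gold bar
--     :param weights_list: list of golds weights
--     :param init_capacity: capacity of knapsack
--     :return: the list of golds` weights that we can put in knapsack
--     """
--     table, weights = get_table(weights_list, init_capacity)
--     golds_number = len(weights)
--     capacity = init_capacity
--     result = table[golds_number][capacity]
--     result_bar_list = []
--
--     for bar in range(golds_number, 0, -1):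
--         if result <= 0 :
--             break
--         if result == table[bar-1][capacity]:
--             continue
--         else:
--             result_bar_list.append(weights[bar-1])
--             result -= weights[bar-1]
--             capacity -= weights[bar-1]
--
--     return result_bar_list
-- ===== SOURCE B (Python) =====
-- def get_goldbar_list(weights_list, init_capacity):
--     # Subset-sum over reachable weights: reach[i] = all subset sums of the first i
--     # bars that fit in the knapsack; then walk the bars backwards, taking a bar
--     # exactly when the remaining target is not reachable without it.
--     reach = [{0}]
--     for w in weights_list:
--         prev = reach[-1]
--         reach.append(prev | {x + w for x in prev if x + w <= init_capacity})
--     result = []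
--     r = max(reach[-1])
--     for i, w in reversed(list(enumerate(weights_list))):
--         if r == 0:
--             break
--         if r not in reach[i]:
--             result.append(w)
--             r -= w
--     return result
-- ===== Notes on version B (the rewrite author's own statement) =====
-- stated objective: alternative
-- what changed: A builds the full (n+1)x(capacity+1) DP table and backtracks by comparing table rows; B instead computes, per prefix of bars, the set of reachable subset sums that fit, and backtracks by testing whether the remaining target sum is reachable without the current bar.
-- outside the precondition, e.g. on get_goldbar_list([-1], 0): A returns [], B returns []
import Mathlib
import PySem

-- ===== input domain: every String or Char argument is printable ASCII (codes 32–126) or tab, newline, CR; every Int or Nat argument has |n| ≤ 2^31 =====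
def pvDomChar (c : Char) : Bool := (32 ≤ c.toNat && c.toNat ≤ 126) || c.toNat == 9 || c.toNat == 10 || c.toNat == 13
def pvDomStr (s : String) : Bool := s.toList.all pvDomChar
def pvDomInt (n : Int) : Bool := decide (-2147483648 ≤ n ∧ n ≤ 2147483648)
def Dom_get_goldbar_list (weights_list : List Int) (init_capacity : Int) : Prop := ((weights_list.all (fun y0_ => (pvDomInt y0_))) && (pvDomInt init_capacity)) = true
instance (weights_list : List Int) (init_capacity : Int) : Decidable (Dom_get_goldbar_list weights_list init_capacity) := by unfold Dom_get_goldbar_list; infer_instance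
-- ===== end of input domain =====

-- B replaces A's full (n+1)x(capacity+1) DP table and table-backtrack by per-prefix
-- reachable-subset-sum sets and a membership-test backtrack (objective: alternative algorithm).


-- ===== PORT A =====
-- Literal port of get_table/get_goldbar_list: list indexing is pyGetD — under Pre_ every
-- index is in range (out-of-range indexing, where the Python raises IndexError, is excluded
-- by Pre_); the `done` flag models Python's `break`.
def get_table (weights : List Int) (capacity : Int) : List (List Int) × List Int :=
  let golds_number : Int := (weights.length : Int)
  let table0 : List (List Int) :=
    (PySem.List.pyRange 0 (golds_number + 1) 1).map (fun _ =>
      (PySem.List.pyRange 0 (capacity + 1) 1).map (fun _ => (0 : Int)))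
  let table :=
    (PySem.List.pyRange 0 (golds_number + 1) 1).foldl (fun table bar =>
      (PySem.List.pyRange 0 (capacity + 1) 1).foldl (fun table weight =>
        let v : Int :=
          if bar = 0 ∨ weight = 0 then 0
          else if PySem.List.pyGetD weights (bar - 1) 0 ≤ weight then
            max (PySem.List.pyGetD weights (bar - 1) 0 +
                  PySem.List.pyGetD (PySem.List.pyGetD table (bar - 1) [])
                    (weight - PySem.List.pyGetD weights (bar - 1) 0) 0)
                (PySem.List.pyGetD (PySem.List.pyGetD table (bar - 1) []) weight 0)
          else PySem.List.pyGetD (PySem.List.pyGetD table (bar - 1) []) weight 0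
        table.modify bar.toNat (fun row => row.set weight.toNat v)) table) table0
  (table, weights)

def get_goldbar_list (weights_list : List Int) (init_capacity : Int) : List Int :=
  let tw := get_table weights_list init_capacity
  let table := tw.1
  let weights := tw.2
  let golds_number : Int := (weights.length : Int)
  let capacity := init_capacity
  let result := PySem.List.pyGetD (PySem.List.pyGetD table golds_number []) capacity 0
  let st := (PySem.List.pyRange golds_number 0 (-1)).foldl (fun st bar =>
      if st.2.2.2 then st
      else if st.1 ≤ 0 then (st.1, st.2.1, st.2.2.1, true)
      else if st.1 = PySem.List.pyGetD (PySem.List.pyGetD table (bar - 1) []) st.2.1 0 then st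
      else (st.1 - PySem.List.pyGetD weights (bar - 1) 0,
            st.2.1 - PySem.List.pyGetD weights (bar - 1) 0,
            st.2.2.1 ++ [PySem.List.pyGetD weights (bar - 1) 0],
            st.2.2.2))
    ((result, capacity, ([] : List Int), false) : Int × Int × List Int × Bool)
  st.2.2.1

-- ===== PORT B =====
def get_goldbar_list_alt (weights_list : List Int) (init_capacity : Int) : List Int :=
  let reach : List (PySem.Set Int) :=
    weights_list.foldl (fun reach w =>
      let prev := PySem.List.pyGetD reach (-1) PySem.Set.empty
      reach ++ [PySem.Set.union prev
        (PySem.Set.ofList ((prev.filter (fun x => x + w ≤ init_capacity)).map (fun x => x + w)))])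
      [PySem.Set.ofList [0]]
  let r := (PySem.List.max? (PySem.List.pyGetD reach (-1) PySem.Set.empty) (fun x => x)).getD 0
  let st := ((PySem.List.enumerate weights_list 0).reverse).foldl (fun st iw =>
      if st.2.2 then st
      else if st.1 = 0 then (st.1, st.2.1, true)
      else if PySem.Set.contains (PySem.List.pyGetD reach iw.1 PySem.Set.empty) st.1 then st
      else (st.1 - iw.2, st.2.1 ++ [iw.2], st.2.2))
    ((r, ([] : List Int), false) : Int × List Int × Bool)
  st.2.1

-- ===== PRECONDITION & SPEC =====
-- Pre_ excludes the inputs on which A raises IndexError: negative capacity (the table rows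
-- are empty) and negative bar weights (the DP recurrence indexes past the row end). In the
-- single degenerate corner init_capacity = 0 with some negative weight A still returns []
-- (and B returns [] there too), but that corner stays outside Pre_.
def Pre_get_goldbar_list (weights_list : List Int) (init_capacity : Int) : Prop :=
  0 ≤ init_capacity ∧ ∀ w ∈ weights_list, 0 ≤ w
instance (weights_list : List Int) (init_capacity : Int) : Decidable (Pre_get_goldbar_list weights_list init_capacity) := by unfold Pre_get_goldbar_list; infer_instance

def pvWitness_get_goldbar_list : List Int × Int := ([3, 1, 2, 2], 5)

def Spec_get_goldbar_list (weights_list : List Int) (init_capacity : Int) (out : List Int) : Prop := out = get_goldbar_list_alt weights_list init_capacity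
instance (weights_list : List Int) (init_capacity : Int) (out : List Int) : Decidable (Spec_get_goldbar_list weights_list init_capacity out) := by unfold Spec_get_goldbar_list; infer_instance

-- ===== CLAIM (what is proved, stated in full; the proofs are below) =====
def Claim_equal_get_goldbar_list : Prop := ∀ (weights_list : List Int) (init_capacity : Int), Dom_get_goldbar_list weights_list init_capacity → Pre_get_goldbar_list weights_list init_capacity → Spec_get_goldbar_list weights_list init_capacity (get_goldbar_list weights_list init_capacity)

-- ===== LEMMAS AND PROOFS =====

def bstep (cap : Int) (s : PySem.Set Int) (w : Int) : PySem.Set Int :=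
  PySem.Set.union s (PySem.Set.ofList ((s.filter (fun x => x + w ≤ cap)).map (fun x => x + w)))

def bset (ws : List Int) (cap : Int) (i : Nat) : PySem.Set Int :=
  (ws.take i).foldl (bstep cap) (PySem.Set.ofList [0])

theorem bset_succ (ws : List Int) (cap : Int) (i : Nat) (h : i < ws.length) :
    bset ws cap (i + 1) = bstep cap (bset ws cap i) (ws.getD i 0) := by
  unfold bset
  have ht : ws.take (i+1) = ws.take i ++ [ws[i]] := by
    rw [List.take_add_one, List.getElem?_eq_getElem h]; rfl
  rw [ht, List.foldl_append, List.foldl_cons, List.foldl_nil, List.getD_eq_getElem ws 0 h]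

theorem fold_reach_gen (cap : Int) : ∀ (ws : List Int) (pref : List (PySem.Set Int)) (s : PySem.Set Int),
    ws.foldl (fun reach w =>
      reach ++ [PySem.Set.union (PySem.List.pyGetD reach (-1) PySem.Set.empty)
        (PySem.Set.ofList ((((PySem.List.pyGetD reach (-1) PySem.Set.empty)).filter
            (fun x => x + w ≤ cap)).map (fun x => x + w)))])
      (pref ++ [s])
    = pref ++ (List.range (ws.length + 1)).map (fun i => (ws.take i).foldl (bstep cap) s) := by
  intro ws
  induction ws with
  | nil => intro pref s; simp
  | cons w ws ih =>
    intro pref s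
    rw [List.foldl_cons, PySem.List.pyGetD_neg_one_append_singleton]
    show List.foldl _ ((pref ++ [s]) ++ [bstep cap s w]) ws = _
    rw [ih (pref ++ [s]) (bstep cap s w)]
    rw [List.length_cons, List.range_succ_eq_map]
    conv_rhs => rw [List.range_succ_eq_map]
    simp only [Function.comp_def, List.take_succ_cons, List.map_map, List.map_cons, List.foldl_cons]
    conv_rhs => rw [List.range_succ_eq_map]
    simp [Function.comp_def]

theorem mem_bstep (cap : Int) (s : PySem.Set Int) (w y : Int) :
    y ∈ bstep cap s w ↔ y ∈ s ∨ ∃ x ∈ s, y = x + w ∧ y ≤ cap := by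
  unfold bstep
  rw [PySem.Set.mem_union]
  constructor
  · rintro (h | h)
    · exact Or.inl h
    · rw [PySem.Set.mem_ofList] at h
      simp only [List.mem_map, List.mem_filter] at h
      obtain ⟨x, ⟨hx, hle⟩, rfl⟩ := h
      exact Or.inr ⟨x, hx, rfl, by simpa using hle⟩
  · rintro (h | ⟨x, hx, rfl, hle⟩)
    · exact Or.inl h
    · right; rw [PySem.Set.mem_ofList]
      simp only [List.mem_map, List.mem_filter]
      exact ⟨x, ⟨hx, by simpa using hle⟩, rfl⟩

theorem zero_mem_bset (ws : List Int) (cap : Int) (i : Nat) (hi : i ≤ ws.length) :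
    (0 : Int) ∈ bset ws cap i := by
  induction i with
  | zero => simp [bset, PySem.Set.mem_ofList]
  | succ i ih =>
    rw [bset_succ ws cap i (by omega), mem_bstep]
    exact Or.inl (ih (by omega))

theorem mem_bset_bounds (ws : List Int) (cap : Int) (hw : ∀ w ∈ ws, 0 ≤ w) (hcap : 0 ≤ cap)
    (i : Nat) (hi : i ≤ ws.length) (y : Int) (hy : y ∈ bset ws cap i) : 0 ≤ y ∧ y ≤ cap := by
  induction i generalizing y with
  | zero => simp [bset, PySem.Set.mem_ofList] at hy; omega
  | succ i ih =>
    rw [bset_succ ws cap i (by omega), mem_bstep] at hy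
    rcases hy with h' | ⟨x, hx, rfl, hle⟩
    · exact ih (by omega) y h'
    · have hx' := ih (by omega) x hx
      have : 0 ≤ ws.getD i 0 := by
        rw [List.getD_eq_getElem ws 0 (by omega)]; exact hw _ (List.getElem_mem (by omega))
      omega

def tval (ws : List Int) : Nat → Int → Int
  | 0, _ => 0
  | i + 1, c =>
    if c = 0 then 0
    else if ws.getD i 0 ≤ c then
      max (ws.getD i 0 + tval ws i (c - ws.getD i 0)) (tval ws i c)
    else tval ws i c

theorem getD_nonneg (ws : List Int) (hw : ∀ w ∈ ws, 0 ≤ w) (i : Nat) : 0 ≤ ws.getD i 0 := by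
  by_cases h : i < ws.length
  · rw [List.getD_eq_getElem ws 0 h]; exact hw _ (List.getElem_mem h)
  · rw [List.getD_eq_default ws 0 (by omega)]

theorem tval_nonneg (ws : List Int) (hw : ∀ w ∈ ws, 0 ≤ w) (i : Nat) (c : Int) (hc : 0 ≤ c) :
    0 ≤ tval ws i c := by
  induction i generalizing c with
  | zero => simp [tval]
  | succ i ih =>
    rw [tval]
    split_ifs with h1 h2
    · omega
    · have := ih c hc
      omega
    · exact ih c hc

theorem tval_le (ws : List Int) (hw : ∀ w ∈ ws, 0 ≤ w) (i : Nat) (c : Int) (hc : 0 ≤ c) :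
    tval ws i c ≤ c := by
  induction i generalizing c with
  | zero => simpa [tval]
  | succ i ih =>
    rw [tval]
    split_ifs with h1 h2
    · omega
    · have hwn := getD_nonneg ws hw i
      have h3 := ih (c - ws.getD i 0) (by omega)
      have h4 := ih c hc
      omega
    · exact ih c hc

theorem tval_mono (ws : List Int) (i : Nat) (c : Int) : tval ws i c ≤ tval ws (i + 1) c := by
  rw [tval]
  split_ifs with h1 h2
  · subst h1
    cases i <;> simp [tval]
  · omega
  · omega

theorem tval_zero (ws : List Int) (i : Nat) : tval ws i 0 = 0 := by
  cases i <;> simp [tval]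

theorem tval_mem_bset (ws : List Int) (cap : Int) (hw : ∀ w ∈ ws, 0 ≤ w) (hcap : 0 ≤ cap)
    (i : Nat) (hi : i ≤ ws.length) (c : Int) (hc : 0 ≤ c) (hcc : c ≤ cap) :
    tval ws i c ∈ bset ws cap i := by
  induction i generalizing c with
  | zero => simp [tval, bset, PySem.Set.mem_ofList]
  | succ i ih =>
    rw [bset_succ ws cap i (by omega), mem_bstep, tval]
    split_ifs with h1 h2
    · exact Or.inl (by simpa using zero_mem_bset ws cap i (by omega))
    · rcases max_cases (ws.getD i 0 + tval ws i (c - ws.getD i 0)) (tval ws i c) with ⟨he, _⟩ | ⟨he, _⟩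
      · rw [he]
        right
        have hwn := getD_nonneg ws hw i
        refine ⟨tval ws i (c - ws.getD i 0), ih (by omega) _ (by omega) (by omega), by ring, ?_⟩
        have := tval_le ws hw i (c - ws.getD i 0) (by omega)
        omega
      · rw [he]; exact Or.inl (ih (by omega) c hc hcc)
    · exact Or.inl (ih (by omega) c hc hcc)

theorem mem_bset_le_tval (ws : List Int) (cap : Int) (hw : ∀ w ∈ ws, 0 ≤ w) (hcap : 0 ≤ cap)
    (i : Nat) (hi : i ≤ ws.length) (c : Int) (hc : 0 ≤ c) (y : Int)
    (hy : y ∈ bset ws cap i) (hyc : y ≤ c) : y ≤ tval ws i c := by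
  induction i generalizing c y with
  | zero => simp [bset, PySem.Set.mem_ofList] at hy; subst hy; exact tval_nonneg ws hw 0 c hc
  | succ i ih =>
    rw [bset_succ ws cap i (by omega), mem_bstep] at hy
    rw [tval]
    have hwn := getD_nonneg ws hw i
    rcases hy with h' | ⟨x, hx, rfl, hle⟩
    · have h1 := ih (by omega) c hc y h' hyc
      have := tval_mono ws i c
      rw [tval] at this
      omega
    · have hxb := mem_bset_bounds ws cap hw hcap i (by omega) x hx
      split_ifs with h1 h2
      · omega
      · have h3 := ih (by omega) (c - ws.getD i 0) (by omega) x hx (by omega)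
        omega
      · omega

theorem mem_bset_iff_tval (ws : List Int) (cap : Int) (hw : ∀ w ∈ ws, 0 ≤ w) (hcap : 0 ≤ cap)
    (i : Nat) (hi : i + 1 ≤ ws.length) (c : Int) (hc : 0 ≤ c) (hcc : c ≤ cap) :
    (tval ws (i + 1) c ∈ bset ws cap i ↔ tval ws i c = tval ws (i + 1) c) := by
  constructor
  · intro h
    have h1 := mem_bset_le_tval ws cap hw hcap i (by omega) c hc _ h
      (tval_le ws hw (i + 1) c hc)
    have h2 := tval_mono ws i c
    omega
  · intro h
    rw [← h]
    exact tval_mem_bset ws cap hw hcap i (by omega) c hc hcc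

theorem max_bset (ws : List Int) (cap : Int) (hw : ∀ w ∈ ws, 0 ≤ w) (hcap : 0 ≤ cap) :
    (PySem.List.max? (bset ws cap ws.length) (fun x => x)).getD 0 = tval ws ws.length cap := by
  have hne : bset ws cap ws.length ≠ [] := by
    intro h
    have := zero_mem_bset ws cap ws.length (le_refl _)
    rw [h] at this
    simp at this
  rcases Option.ne_none_iff_exists'.mp
    (fun h => hne ((PySem.List.max?_eq_none_iff (bset ws cap ws.length) (fun x : Int => x)).mp h)) with ⟨m, hm⟩
  rw [hm]
  have hmem := PySem.List.max?_mem hm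
  have hb := mem_bset_bounds ws cap hw hcap ws.length (le_refl _) m hmem
  have h1 := mem_bset_le_tval ws cap hw hcap ws.length (le_refl _) cap hcap m hmem hb.2
  have h2 := PySem.List.max?_isMax hm _ (tval_mem_bset ws cap hw hcap ws.length (le_refl _) cap hcap (le_refl _))
  simp at h2 ⊢
  omega

def innerF (ws : List Int) (cap : Int) (bar : Int) (table : List (List Int)) (weight : Int) : List (List Int) :=
  let v : Int :=
    if bar = 0 ∨ weight = 0 then 0
    else if PySem.List.pyGetD ws (bar - 1) 0 ≤ weight then
      max (PySem.List.pyGetD ws (bar - 1) 0 +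
            PySem.List.pyGetD (PySem.List.pyGetD table (bar - 1) [])
              (weight - PySem.List.pyGetD ws (bar - 1) 0) 0)
          (PySem.List.pyGetD (PySem.List.pyGetD table (bar - 1) []) weight 0)
    else PySem.List.pyGetD (PySem.List.pyGetD table (bar - 1) []) weight 0
  table.modify bar.toNat (fun row => row.set weight.toNat v)

def zrow (cap : Int) : List Int := (PySem.List.pyRange 0 (cap + 1) 1).map (fun _ => (0 : Int))

def frow (ws : List Int) (cap : Int) (k : Nat) : List Int :=
  (PySem.List.pyRange 0 (cap + 1) 1).map (fun c => tval ws k c)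

def prow (ws : List Int) (cap : Int) (k : Nat) (j : Int) : List Int :=
  (PySem.List.pyRange 0 (cap + 1) 1).map (fun c => if c < j then tval ws k c else 0)

def tabP (ws : List Int) (cap : Int) (k : Nat) (j : Int) : List (List Int) :=
  (PySem.List.pyRange 0 ((ws.length : Int) + 1) 1).map
    (fun b => if b < (k : Int) then frow ws cap b.toNat
      else if b = (k : Int) then prow ws cap k j else zrow cap)

theorem prow_zero (ws : List Int) (cap : Int) (k : Nat) : prow ws cap k 0 = zrow cap := by
  unfold prow zrow
  apply List.map_congr_left
  intro c hc
  rw [PySem.List.mem_pyRange_one] at hc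
  simp
  omega

theorem getD_frow (ws : List Int) (cap : Int) (k : Nat) (c : Int) (h0 : 0 ≤ c) (h1 : c < cap + 1) :
    PySem.List.pyGetD (frow ws cap k) c 0 = tval ws k c :=
  PySem.List.pyGetD_map_pyRange_of_nonneg _ _ _ _ h0 h1

theorem tabP_write (ws : List Int) (cap : Int) (k : Nat) (j : Int)
    (hj0 : 0 ≤ j) (hj : j ≤ cap) (v : Int) (hv : v = tval ws k j) :
    (tabP ws cap k j).modify ((k : Int)).toNat (fun row => row.set j.toNat v)
      = tabP ws cap k (j + 1) := by
  have hlen : ∀ j', (tabP ws cap k j').length = ((ws.length : Int) + 1).toNat := by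
    intro j'; simp [tabP, PySem.List.length_pyRange_one]
  have hlp : ∀ j', (prow ws cap k j').length = (cap + 1).toNat := by
    intro j'; simp [prow, PySem.List.length_pyRange_one]
  apply List.ext_getElem
  · rw [List.length_modify, hlen, hlen]
  · intro i h1 h2
    have hi : i < ((ws.length : Int) + 1).toNat := by rw [← hlen (j + 1)]; exact h2
    rw [List.getElem_modify]
    have hget : ∀ j' (h : i < (tabP ws cap k j').length),
        (tabP ws cap k j')[i]'h =
        (if (i : Int) < (k : Int) then frow ws cap ((i : Int)).toNat
          else if (i : Int) = (k : Int) then prow ws cap k j' else zrow cap) := by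
      intro j' h
      unfold tabP
      rw [List.getElem_map, PySem.List.getElem_pyRange_one]
      norm_num
    rw [hget j, hget (j + 1)]
    by_cases hik : ((k : Int)).toNat = i
    · rw [if_pos hik]
      have hik' : (i : Int) = (k : Int) := by omega
      rw [hik']
      rw [if_neg (lt_irrefl _), if_neg (lt_irrefl _), if_pos rfl, if_pos rfl]
      apply List.ext_getElem
      · rw [List.length_set, hlp, hlp]
      · intro c hc1 hc2
        have hc : c < (cap + 1).toNat := by rw [← hlp (j + 1)]; exact hc2
        rw [List.getElem_set]
        have hgp : ∀ j' (h : c < (prow ws cap k j').length),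
            (prow ws cap k j')[c]'h = (if (c : Int) < j' then tval ws k (c : Int) else 0) := by
          intro j' h
          unfold prow
          rw [List.getElem_map, PySem.List.getElem_pyRange_one]
          norm_num
        rw [hgp j, hgp (j + 1)]
        by_cases hcj : j.toNat = c
        · rw [if_pos hcj]
          have hcv : (c : Int) = j := by omega
          rw [if_pos (by omega), hv, hcv]
        · rw [if_neg hcj]
          by_cases hlt : (c : Int) < j
          · rw [if_pos hlt, if_pos (by omega)]
          · rw [if_neg hlt, if_neg (by omega)]
    · rw [if_neg hik]
      by_cases hlt : (i : Int) < (k : Int)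
      · rw [if_pos hlt, if_pos hlt]
      · rw [if_neg hlt, if_neg hlt, if_neg (by omega), if_neg (by omega)]

-- the value the inner loop writes at (k, j) is tval ws k j

theorem innerF_val (ws : List Int) (cap : Int) (hcap : 0 ≤ cap) (hw : ∀ w ∈ ws, 0 ≤ w)
    (k : Nat) (hk : k ≤ ws.length) (j : Int) (hj0 : 0 ≤ j) (hj : j ≤ cap) :
    (if (k : Int) = 0 ∨ j = 0 then 0
      else if PySem.List.pyGetD ws ((k : Int) - 1) 0 ≤ j then
        max (PySem.List.pyGetD ws ((k : Int) - 1) 0 +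
              PySem.List.pyGetD (PySem.List.pyGetD (tabP ws cap k j) ((k : Int) - 1) [])
                (j - PySem.List.pyGetD ws ((k : Int) - 1) 0) 0)
            (PySem.List.pyGetD (PySem.List.pyGetD (tabP ws cap k j) ((k : Int) - 1) []) j 0)
      else PySem.List.pyGetD (PySem.List.pyGetD (tabP ws cap k j) ((k : Int) - 1) []) j 0)
      = tval ws k j := by
  have hwn : ∀ m : Nat, 0 ≤ ws.getD m 0 := by
    intro m
    by_cases h : m < ws.length
    · rw [List.getD_eq_getElem ws 0 h]; exact hw _ (List.getElem_mem h)
    · rw [List.getD_eq_default ws 0 (by omega)]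
  by_cases hk0 : k = 0
  · subst hk0; simp [tval]
  · obtain ⟨m, rfl⟩ := Nat.exists_eq_succ_of_ne_zero hk0
    by_cases hj0' : j = 0
    · subst hj0'; simp [tval]
    · rw [if_neg (by push_cast; omega)]
      have he1 : (((m + 1 : Nat) : Int)) - 1 = ((m : Nat) : Int) := by push_cast; omega
      rw [he1]
      have hrow : PySem.List.pyGetD (tabP ws cap (m + 1) j) ((m : Nat) : Int) [] = frow ws cap m := by
        unfold tabP
        rw [PySem.List.pyGetD_map_pyRange_of_nonneg _ _ _ _ (by positivity) (by push_cast; omega)]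
        rw [if_pos (by push_cast; omega)]
        simp
      rw [hrow, PySem.List.pyGetD_natCast]
      have hw0 : 0 ≤ ws.getD m 0 := hwn m
      rw [tval, if_neg hj0']
      by_cases hle : ws.getD m 0 ≤ j
      · rw [if_pos hle, if_pos hle,
          getD_frow ws cap m _ (by omega) (by omega), getD_frow ws cap m _ (by omega) (by omega)]
      · rw [if_neg hle, if_neg hle, getD_frow ws cap m _ (by omega) (by omega)]

-- the step of the inner loop

theorem innerF_step (ws : List Int) (cap : Int) (hcap : 0 ≤ cap) (hw : ∀ w ∈ ws, 0 ≤ w)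
    (k : Nat) (hk : k ≤ ws.length) (j : Int) (hj0 : 0 ≤ j) (hj : j ≤ cap) :
    innerF ws cap (k : Int) (tabP ws cap k j) j = tabP ws cap k (j + 1) := by
  unfold innerF
  exact tabP_write ws cap k j hj0 hj _ (innerF_val ws cap hcap hw k hk j hj0 hj)

theorem inner_loop (ws : List Int) (cap : Int) (hcap : 0 ≤ cap) (hw : ∀ w ∈ ws, 0 ≤ w)
    (k : Nat) (hk : k ≤ ws.length) :
    ∀ (j : Int), 0 ≤ j → j ≤ cap + 1 →
      (PySem.List.pyRange 0 j 1).foldl (innerF ws cap (k : Int)) (tabP ws cap k 0)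
        = tabP ws cap k j := by
  intro j h0 h1
  obtain ⟨m, rfl⟩ : ∃ m : Nat, (m : Int) = j := ⟨j.toNat, by omega⟩
  induction m with
  | zero => simp [PySem.List.pyRange_zero_nat]
  | succ m ih =>
    have hm : ((m : Nat) : Int) ≤ cap := by push_cast at h1 ⊢; omega
    rw [show (((m + 1 : Nat) : Int)) = ((m : Nat) : Int) + 1 by push_cast; ring]
    rw [PySem.List.pyRange_one_succ_right (a := 0) (b := ((m : Nat) : Int)) (by positivity),
      List.foldl_append, List.foldl_cons, List.foldl_nil, ih (by positivity) (by omega)]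
    exact innerF_step ws cap hcap hw k hk _ (by positivity) hm

theorem tabP_shift (ws : List Int) (cap : Int) (k : Nat) (hk : k ≤ ws.length) :
    tabP ws cap k (cap + 1) = tabP ws cap (k + 1) 0 := by
  unfold tabP
  apply List.map_congr_left
  intro b hb
  rw [PySem.List.mem_pyRange_one] at hb
  by_cases h1 : b < (k : Int)
  · rw [if_pos h1, if_pos (by push_cast; omega)]
  · by_cases h2 : b = (k : Int)
    · rw [if_neg h1, if_pos h2, if_pos (by push_cast; omega)]
      subst h2
      unfold prow frow
      apply List.map_congr_left
      intro c hc
      rw [PySem.List.mem_pyRange_one] at hc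
      rw [if_pos (by omega)]
      norm_num
    · rw [if_neg h1, if_neg h2, if_neg (by push_cast; omega)]
      by_cases h3 : b = ((k : Int) + 1)
      · rw [if_pos (by push_cast; omega), prow_zero]
      · rw [if_neg (by push_cast; omega)]

theorem outer_loop (ws : List Int) (cap : Int) (hcap : 0 ≤ cap) (hw : ∀ w ∈ ws, 0 ≤ w) :
    ∀ (k : Nat), k ≤ ws.length + 1 →
      (PySem.List.pyRange 0 (k : Int) 1).foldl
        (fun table bar => (PySem.List.pyRange 0 (cap + 1) 1).foldl (innerF ws cap bar) table)
        (tabP ws cap 0 0)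
      = tabP ws cap k 0 := by
  intro k hk
  induction k with
  | zero => simp [PySem.List.pyRange_zero_nat]
  | succ k ih =>
    rw [show (((k + 1 : Nat) : Int)) = ((k : Nat) : Int) + 1 by push_cast; ring]
    rw [PySem.List.pyRange_one_succ_right (a := 0) (b := ((k : Nat) : Int)) (by positivity),
      List.foldl_append, List.foldl_cons, List.foldl_nil, ih (by omega)]
    rw [inner_loop ws cap hcap hw k (by omega) (cap + 1) (by omega) (le_refl _)]
    exact tabP_shift ws cap k (by omega)

theorem table_eq (ws : List Int) (cap : Int) (hw : ∀ w ∈ ws, 0 ≤ w) (hcap : 0 ≤ cap) :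
    (get_table ws cap).1 =
      (PySem.List.pyRange 0 ((ws.length : Int) + 1) 1).map (fun b =>
        (PySem.List.pyRange 0 (cap + 1) 1).map (fun c => tval ws b.toNat c)) := by
  have h0 : (PySem.List.pyRange 0 ((ws.length : Int) + 1) 1).map
      (fun _ => (PySem.List.pyRange 0 (cap + 1) 1).map (fun _ => (0 : Int)))
      = tabP ws cap 0 0 := by
    unfold tabP
    apply List.map_congr_left
    intro b hb
    rw [PySem.List.mem_pyRange_one] at hb
    simp only [Nat.cast_zero]
    rw [if_neg (by omega)]
    by_cases h : b = 0
    · rw [if_pos h, prow_zero]; rfl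
    · rw [if_neg h]; rfl
  have hmain : (get_table ws cap).1 = tabP ws cap (ws.length + 1) 0 := by
    show ((PySem.List.pyRange 0 ((ws.length : Int) + 1) 1).foldl
        (fun table bar => (PySem.List.pyRange 0 (cap + 1) 1).foldl (innerF ws cap bar) table)
        ((PySem.List.pyRange 0 ((ws.length : Int) + 1) 1).map
          (fun _ => (PySem.List.pyRange 0 (cap + 1) 1).map (fun _ => (0 : Int))))) = _
    rw [h0]
    have := outer_loop ws cap hcap hw (ws.length + 1) (le_refl _)
    rw [show (((ws.length + 1 : Nat) : Int)) = ((ws.length : Nat) : Int) + 1 by push_cast; ring] at this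
    exact this
  rw [hmain]
  unfold tabP frow
  apply List.map_congr_left
  intro b hb
  rw [PySem.List.mem_pyRange_one] at hb
  rw [if_pos (by push_cast; omega)]

def sol (ws : List Int) : Nat → Int → List Int
  | 0, _ => []
  | i + 1, c =>
    if tval ws (i + 1) c ≤ 0 then []
    else if tval ws (i + 1) c = tval ws i c then sol ws i c
    else ws.getD i 0 :: sol ws i (c - ws.getD i 0)

def stepA (table : List (List Int)) (weights : List Int)
    (st : Int × Int × List Int × Bool) (bar : Int) : Int × Int × List Int × Bool :=
  if st.2.2.2 then st
  else if st.1 ≤ 0 then (st.1, st.2.1, st.2.2.1, true)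
  else if st.1 = PySem.List.pyGetD (PySem.List.pyGetD table (bar - 1) []) st.2.1 0 then st
  else (st.1 - PySem.List.pyGetD weights (bar - 1) 0,
        st.2.1 - PySem.List.pyGetD weights (bar - 1) 0,
        st.2.2.1 ++ [PySem.List.pyGetD weights (bar - 1) 0],
        st.2.2.2)

def stepB (reach : List (PySem.Set Int))
    (st : Int × List Int × Bool) (iw : Int × Int) : Int × List Int × Bool :=
  if st.2.2 then st
  else if st.1 = 0 then (st.1, st.2.1, true)
  else if PySem.Set.contains (PySem.List.pyGetD reach iw.1 PySem.Set.empty) st.1 then st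
  else (st.1 - iw.2, st.2.1 ++ [iw.2], st.2.2)

theorem stepA_done (table : List (List Int)) (weights : List Int)
    (l : List Int) (st : Int × Int × List Int × Bool) (h : st.2.2.2 = true) :
    l.foldl (stepA table weights) st = st := by
  induction l with
  | nil => rfl
  | cons x l ih => rw [List.foldl_cons, stepA, if_pos h]; exact ih

theorem stepB_done (reach : List (PySem.Set Int))
    (l : List (Int × Int)) (st : Int × List Int × Bool) (h : st.2.2 = true) :
    l.foldl (stepB reach) st = st := by
  induction l with
  | nil => rfl
  | cons x l ih => rw [List.foldl_cons, stepB, if_pos h]; exact ih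

theorem aloop (ws : List Int) (cap : Int) (hcap : 0 ≤ cap) (hw : ∀ w ∈ ws, 0 ≤ w)
    (T : List (List Int))
    (hT : ∀ (b : Nat) (c : Int), b ≤ ws.length → 0 ≤ c → c ≤ cap →
      PySem.List.pyGetD (PySem.List.pyGetD T (b : Int) []) c 0 = tval ws b c) :
    ∀ (i : Nat), i ≤ ws.length → ∀ (c : Int), 0 ≤ c → c ≤ cap → ∀ (acc : List Int),
      ((PySem.List.pyRange (i : Int) 0 (-1)).foldl (stepA T ws)
        (tval ws i c, c, acc, false)).2.2.1 = acc ++ sol ws i c := by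
  intro i
  induction i with
  | zero =>
    intro _ c _ _ acc
    rw [PySem.List.pyRange_neg_one_eq_nil (by omega)]
    simp [sol]
  | succ i ih =>
    intro hi c hc0 hc acc
    have hwn : 0 ≤ ws.getD i 0 := getD_nonneg ws hw i
    rw [PySem.List.pyRange_neg_one_cons (by positivity), List.foldl_cons]
    rw [stepA]
    simp only [if_neg Bool.false_ne_true]
    by_cases hr : tval ws (i + 1) c ≤ 0
    · rw [if_pos hr, stepA_done _ _ _ _ rfl]
      rw [sol, if_pos hr, List.append_nil]
    · rw [if_neg hr]
      have hidx : (((i + 1 : Nat) : Int)) - 1 = ((i : Nat) : Int) := by push_cast; ring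
      have hTi : PySem.List.pyGetD (PySem.List.pyGetD T (((i + 1 : Nat) : Int)) []) c 0
          = tval ws (i + 1) c := hT (i + 1) c hi hc0 hc
      by_cases he : tval ws (i + 1) c = tval ws i c
      · rw [if_pos (by rw [hidx, hT i c (by omega) hc0 hc]; exact he)]
        rw [sol, if_neg hr, if_pos he, he, hidx]
        exact ih (by omega) c hc0 hc acc
      · rw [if_neg (by rw [hidx, hT i c (by omega) hc0 hc]; exact he)]
        have hcne : c ≠ 0 := by
          intro h
          rw [h, tval_zero] at hr
          omega
        have hle : ws.getD i 0 ≤ c := by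
          by_contra h
          rw [tval, if_neg hcne, if_neg h] at he
          exact he rfl
        have ht : tval ws (i + 1) c
            = max (ws.getD i 0 + tval ws i (c - ws.getD i 0)) (tval ws i c) := by
          rw [tval, if_neg hcne, if_pos hle]
        have hmax : tval ws (i + 1) c = ws.getD i 0 + tval ws i (c - ws.getD i 0) := by
          rcases max_choice (ws.getD i 0 + tval ws i (c - ws.getD i 0)) (tval ws i c) with h | h
          · rw [ht, h]
          · exact absurd (ht.trans h) he
        simp only [hidx, PySem.List.pyGetD_natCast]
        rw [show tval ws (i + 1) c - ws.getD i 0 = tval ws i (c - ws.getD i 0) by omega,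
          show c - ws.getD i 0 = c - ws.getD i 0 from rfl]
        rw [ih (by omega) (c - ws.getD i 0) (by omega) (by omega) (acc ++ [ws.getD i 0])]
        rw [sol, if_neg hr, if_neg he, List.append_assoc, List.singleton_append]

theorem bloop (ws : List Int) (cap : Int) (hcap : 0 ≤ cap) (hw : ∀ w ∈ ws, 0 ≤ w)
    (R : List (PySem.Set Int)) (hR : R = (List.range (ws.length + 1)).map (bset ws cap)) :
    ∀ (i : Nat), i ≤ ws.length → ∀ (c : Int), 0 ≤ c → c ≤ cap → ∀ (acc : List Int),
      (((PySem.List.enumerate (ws.take i) 0).reverse).foldl (stepB R)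
        (tval ws i c, acc, false)).2.1 = acc ++ sol ws i c := by
  intro i
  induction i with
  | zero =>
    intro _ c _ _ acc
    simp [PySem.List.enumerate, sol]
  | succ i ih =>
    intro hi c hc0 hc acc
    have hwn : 0 ≤ ws.getD i 0 := getD_nonneg ws hw i
    have htake : ws.take (i + 1) = ws.take i ++ [ws[i]'(by omega)] := by
      rw [List.take_add_one, List.getElem?_eq_getElem (by omega : i < ws.length)]; rfl
    rw [htake, PySem.List.enumerate_append, List.reverse_append, List.length_take]
    have hlen : min (i + 1 - 1) ws.length = i := by omega
    simp only [PySem.List.enumerate, List.reverse_cons, List.reverse_nil, List.nil_append]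
    rw [List.singleton_append, List.foldl_cons]
    have hRi : PySem.List.pyGetD R ((0 : Int) + (min i ws.length : Nat)) PySem.Set.empty
        = bset ws cap i := by
      rw [hR]
      have hmin : min i ws.length = i := by omega
      rw [hmin]
      simp only [zero_add, PySem.List.pyGetD_natCast]
      rw [List.getD_eq_getElem _ _ (by simp; omega), List.getElem_map, List.getElem_range]
    rw [stepB]
    simp only [if_neg Bool.false_ne_true]
    have hge : ws[i]'(by omega) = ws.getD i 0 := (List.getD_eq_getElem ws 0 (by omega)).symm
    by_cases hr : tval ws (i + 1) c = 0
    · rw [if_pos hr, stepB_done _ _ _ rfl]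
      rw [sol, if_pos (by omega), List.append_nil]
    · rw [if_neg hr]
      have hrpos : ¬ tval ws (i + 1) c ≤ 0 := by
        have := tval_nonneg ws hw (i + 1) c hc0
        omega
      by_cases he : tval ws (i + 1) c = tval ws i c
      · rw [if_pos ?hc1]
        case hc1 =>
          rw [hRi, PySem.Set.contains_iff]
          exact (mem_bset_iff_tval ws cap hw hcap i hi c hc0 hc).mpr he.symm
        rw [sol, if_neg hrpos, if_pos he, he]
        exact ih (by omega) c hc0 hc acc
      · rw [if_neg ?hc2]
        case hc2 =>
          rw [hRi, PySem.Set.contains_iff]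
          intro hmem
          exact he ((mem_bset_iff_tval ws cap hw hcap i hi c hc0 hc).mp hmem).symm
        have hcne : c ≠ 0 := by
          intro h
          rw [h, tval_zero] at hr
          exact hr rfl
        have hle : ws.getD i 0 ≤ c := by
          by_contra h
          rw [tval, if_neg hcne, if_neg h] at he
          exact he rfl
        have ht : tval ws (i + 1) c
            = max (ws.getD i 0 + tval ws i (c - ws.getD i 0)) (tval ws i c) := by
          rw [tval, if_neg hcne, if_pos hle]
        have hmax : tval ws (i + 1) c = ws.getD i 0 + tval ws i (c - ws.getD i 0) := by
          rcases max_choice (ws.getD i 0 + tval ws i (c - ws.getD i 0)) (tval ws i c) with h | h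
          · rw [ht, h]
          · exact absurd (ht.trans h) he
        simp only [hge]
        rw [show tval ws (i + 1) c - ws.getD i 0 = tval ws i (c - ws.getD i 0) by omega]
        rw [ih (by omega) (c - ws.getD i 0) (by omega) (by omega) (acc ++ [ws.getD i 0])]
        rw [sol, if_neg hrpos, if_neg he, List.append_assoc, List.singleton_append]

theorem hT_of_table (ws : List Int) (cap : Int) (hw : ∀ w ∈ ws, 0 ≤ w) (hcap : 0 ≤ cap)
    (b : Nat) (c : Int) (hb : b ≤ ws.length) (hc0 : 0 ≤ c) (hc : c ≤ cap) :
    PySem.List.pyGetD (PySem.List.pyGetD (get_table ws cap).1 (b : Int) []) c 0 = tval ws b c := by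
  rw [table_eq ws cap hw hcap]
  rw [PySem.List.pyGetD_map_pyRange_of_nonneg _ _ _ _ (by positivity) (by push_cast; omega)]
  rw [PySem.List.pyGetD_map_pyRange_of_nonneg _ _ _ _ hc0 (by omega)]
  norm_num

def reachFold (ws : List Int) (cap : Int) : List (PySem.Set Int) :=
  ws.foldl (fun reach w =>
      reach ++ [PySem.Set.union (PySem.List.pyGetD reach (-1) PySem.Set.empty)
        (PySem.Set.ofList ((((PySem.List.pyGetD reach (-1) PySem.Set.empty)).filter
            (fun x => x + w ≤ cap)).map (fun x => x + w)))])
      [PySem.Set.ofList [0]]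

theorem reachFold_eq (ws : List Int) (cap : Int) :
    reachFold ws cap = (List.range (ws.length + 1)).map (bset ws cap) := by
  unfold reachFold
  have h := fold_reach_gen cap ws [] (PySem.Set.ofList [0])
  rw [List.nil_append] at h
  rw [h, List.nil_append]
  rfl

theorem reachFold_last (ws : List Int) (cap : Int) :
    PySem.List.pyGetD (reachFold ws cap) (-1) PySem.Set.empty = bset ws cap ws.length := by
  rw [reachFold_eq, List.range_succ, List.map_append, List.map_singleton,
    PySem.List.pyGetD_neg_one_append_singleton]

theorem main_eq (ws : List Int) (cap : Int) (hcap : 0 ≤ cap) (hw : ∀ w ∈ ws, 0 ≤ w) :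
    get_goldbar_list ws cap = get_goldbar_list_alt ws cap := by
  have hA : get_goldbar_list ws cap =
      ((PySem.List.pyRange ((ws.length : Int)) 0 (-1)).foldl
        (stepA (get_table ws cap).1 ws)
        (PySem.List.pyGetD (PySem.List.pyGetD (get_table ws cap).1 ((ws.length : Int)) []) cap 0,
          cap, ([] : List Int), false)).2.2.1 := rfl
  have hB : get_goldbar_list_alt ws cap =
      (((PySem.List.enumerate ws 0).reverse).foldl (stepB (reachFold ws cap))
        ((PySem.List.max? (PySem.List.pyGetD (reachFold ws cap) (-1) PySem.Set.empty)
            (fun x => x)).getD 0, ([] : List Int), false)).2.1 := rfl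
  rw [hA, hB]
  rw [hT_of_table ws cap hw hcap ws.length cap (le_refl _) hcap (le_refl _)]
  rw [reachFold_last, max_bset ws cap hw hcap]
  rw [aloop ws cap hcap hw (get_table ws cap).1
    (fun b c hb hc0 hc => hT_of_table ws cap hw hcap b c hb hc0 hc)
    ws.length (le_refl _) cap hcap (le_refl _) []]
  have := bloop ws cap hcap hw (reachFold ws cap) (reachFold_eq ws cap)
    ws.length (le_refl _) cap hcap (le_refl _) []
  rw [List.take_length] at this
  rw [this]

-- ===== VERDICT (by name: the statement is the Claim_ definition above) =====
theorem get_goldbar_list_spec : Claim_equal_get_goldbar_list := by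
  intro ws cap _ hpre
  unfold Spec_get_goldbar_list
  exact (main_eq ws cap hpre.1 hpre.2)
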